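-- pv_equiv track=rewrite | github.com/peteromallet/Headless-Wan2GP | test_consolidation.py | consolidate_group_frames
-- ===== SOURCE A (Python) =====
-- def consolidate_group_frames(segment_frames, max_frames=81):
--     """
--     Consolidate a group of segments into fewer segments respecting frame limits.
--     Replicates the real keyframe-based algorithm from optimize_frame_allocation_for_identical_params.
--
--     Key concept: Each segment represents travel between keyframe images.
--     With segments [20, 15, 25], we have 4 keyframe images at positions [0, 20, 35, 60].
--
--     NOTE: Quantization is NOT applied here - it happens during actual video generation.
--     This consolidation preserves exact frame counts.
--
--     Args:
--         segment_frames: List of frame counts for segments in this group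
--         max_frames: Maximum frames per consolidated segment
--
--     Returns:
--         List of consolidated frame counts (exact, no quantization)
--     """
--     if not segment_frames:
--         return []
--
--     if len(segment_frames) == 1:
--         # Single segment - just return it (no consolidation needed)
--         return segment_frames
--
--     # Calculate keyframe positions (cumulative frame positions where images appear)
--     keyframe_positions = [0]
--     cumulative_pos = 0
--
--     for frames in segment_frames:
--         cumulative_pos += frames
--         keyframe_positions.append(cumulative_pos)
--
--     # Now consolidate: group keyframes into videos respecting frame limit
--     consolidated_segments = []
--     video_start = 0
--     video_keyframes = [0]  # Always include first keyframe
--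
--     for i in range(1, len(keyframe_positions)):
--         kf_pos = keyframe_positions[i]
--         # Calculate how long the video would be if we include this keyframe
--         # Note: This is the raw frame count from video_start to this keyframe
--         video_length_if_included = kf_pos - video_start
--
--         if video_length_if_included <= max_frames:
--             # Keyframe fits in current video
--             video_keyframes.append(kf_pos)
--         else:
--             # Current video is full, finalize it
--             final_frame = video_keyframes[-1]
--             video_length = final_frame - video_start
--             consolidated_segments.append(video_length)
--
--             # Start new video from the last keyframe
--             video_start = video_keyframes[-1]
--             video_keyframes = [video_start, kf_pos]
--
--     # Finalize the last video
--     final_frame = video_keyframes[-1]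
--     video_length = final_frame - video_start
--     consolidated_segments.append(video_length)
--
--     return consolidated_segments
-- ===== SOURCE B (Python) =====
-- def consolidate_group_frames(segment_frames, max_frames=81):
--     if not segment_frames:
--         return []
--     if len(segment_frames) == 1:
--         return segment_frames
--     result = []
--     cur = 0
--     for s in segment_frames:
--         if cur + s <= max_frames:
--             cur += s
--         else:
--             result.append(cur)
--             cur = s
--     result.append(cur)
--     return result
-- ===== Notes on version B (the rewrite author's own statement) =====
-- stated objective: simpler
-- what changed: Single running current-video length folded once over segment_frames replaces A's prefix-sum keyframe array plus a second loop maintaining video_start and video_keyframes lists.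
import Mathlib
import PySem

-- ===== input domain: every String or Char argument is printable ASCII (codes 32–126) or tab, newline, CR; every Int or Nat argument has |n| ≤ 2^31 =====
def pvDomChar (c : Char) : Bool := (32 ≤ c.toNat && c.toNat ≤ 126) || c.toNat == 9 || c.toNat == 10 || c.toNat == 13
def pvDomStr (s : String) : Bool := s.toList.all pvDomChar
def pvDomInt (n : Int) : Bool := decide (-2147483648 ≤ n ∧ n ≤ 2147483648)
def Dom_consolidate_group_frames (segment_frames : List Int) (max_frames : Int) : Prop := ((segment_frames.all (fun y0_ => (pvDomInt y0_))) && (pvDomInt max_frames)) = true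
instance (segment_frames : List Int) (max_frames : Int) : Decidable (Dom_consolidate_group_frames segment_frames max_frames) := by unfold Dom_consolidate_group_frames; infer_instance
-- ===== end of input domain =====

-- B replaces A's prefix-sum keyframe array and keyframe-list bookkeeping by one
-- running current-video length folded directly over segment_frames (objective: simpler).

-- ===== PORT A =====
-- `l[-1]` for the always-nonempty video_keyframes lists (exact for nonempty lists).
def pvLastA (l : List Int) : Int := l.getLastD 0

def consolidate_group_frames (segment_frames : List Int) (max_frames : Int) : List Int :=
  if segment_frames = [] then []
  else if segment_frames.length = 1 then segment_frames
  else
    -- keyframe_positions = [0]; cumulative_pos = 0; for frames in …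
    let kp := (segment_frames.foldl
      (fun (st : List Int × Int) frames =>
        let c := st.2 + frames
        (st.1 ++ [c], c)) ([(0 : Int)], (0 : Int))).1
    -- for i in range(1, len(keyframe_positions)): state (consolidated_segments, video_start, video_keyframes)
    let st := (kp.drop 1).foldl
      (fun (st : List Int × Int × List Int) kf_pos =>
        let cons := st.1; let video_start := st.2.1; let vk := st.2.2
        if kf_pos - video_start ≤ max_frames then
          (cons, video_start, vk ++ [kf_pos])
        else
          let final_frame := pvLastA vk
          (cons ++ [final_frame - video_start], final_frame, [final_frame, kf_pos]))
      ([], (0 : Int), [(0 : Int)])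
    st.1 ++ [pvLastA st.2.2 - st.2.1]

-- ===== PORT B =====
def consolidate_group_frames_alt (segment_frames : List Int) (max_frames : Int) : List Int :=
  if segment_frames = [] then []
  else if segment_frames.length = 1 then segment_frames
  else
    let st := segment_frames.foldl
      (fun (st : List Int × Int) s =>
        if st.2 + s ≤ max_frames then (st.1, st.2 + s)
        else (st.1 ++ [st.2], s)) ([], (0 : Int))
    st.1 ++ [st.2]

-- ===== PRECONDITION & SPEC =====
def Spec_consolidate_group_frames (segment_frames : List Int) (max_frames : Int) (out : List Int) : Prop := out = consolidate_group_frames_alt segment_frames max_frames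
instance (segment_frames : List Int) (max_frames : Int) (out : List Int) : Decidable (Spec_consolidate_group_frames segment_frames max_frames out) := by unfold Spec_consolidate_group_frames; infer_instance

-- ===== CLAIM (what is proved, stated in full; the proofs are below) =====
def Claim_equal_consolidate_group_frames : Prop := ∀ (segment_frames : List Int) (max_frames : Int), Dom_consolidate_group_frames segment_frames max_frames → Spec_consolidate_group_frames segment_frames max_frames (consolidate_group_frames segment_frames max_frames)

-- ===== LEMMAS AND PROOFS =====

-- the keyframe positions produced by A's first loop, as a structural list
def pvKfs (c : Int) : List Int → List Int
  | [] => []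
  | s :: rest => (c + s) :: pvKfs (c + s) rest

theorem pvKp_eq (sf : List Int) : ∀ (acc : List Int) (c : Int),
    (sf.foldl (fun (st : List Int × Int) frames =>
      let cc := st.2 + frames
      (st.1 ++ [cc], cc)) (acc, c)).1 = acc ++ pvKfs c sf := by
  induction sf with
  | nil => intro acc c; simp [pvKfs]
  | cons s rest ih =>
      intro acc c
      simp only [List.foldl_cons, pvKfs]
      rw [ih]
      simp

theorem pvLastA_append (l : List Int) (x : Int) : pvLastA (l ++ [x]) = x := by
  simp [pvLastA]

theorem pvLoop_eq (sf : List Int) : ∀ (cons : List Int) (vs cur : Int) (vk : List Int),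
    pvLastA vk = vs + cur →
    (let st := (pvKfs (vs + cur) sf).foldl
        (fun (st : List Int × Int × List Int) kf_pos =>
          let c := st.1; let video_start := st.2.1; let v := st.2.2
          if kf_pos - video_start ≤ max_frames then
            (c, video_start, v ++ [kf_pos])
          else
            let final_frame := pvLastA v
            (c ++ [final_frame - video_start], final_frame, [final_frame, kf_pos]))
        (cons, vs, vk)
     st.1 ++ [pvLastA st.2.2 - st.2.1])
    =
    (let st := sf.foldl
        (fun (st : List Int × Int) s =>
          if st.2 + s ≤ max_frames then (st.1, st.2 + s)
          else (st.1 ++ [st.2], s)) (cons, cur)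
     st.1 ++ [st.2]) := by
  induction sf with
  | nil =>
      intro cons vs cur vk h
      simp [pvKfs, h]
  | cons s rest ih =>
      intro cons vs cur vk h
      simp only [pvKfs, List.foldl_cons]
      by_cases hc : cur + s ≤ max_frames
      · have hcond : vs + cur + s - vs ≤ max_frames := by omega
        simp only [hcond, if_pos, hc]
        have h2 : pvLastA (vk ++ [vs + cur + s]) = vs + (cur + s) := by
          rw [pvLastA_append]; ring
        have := ih cons vs (cur + s) (vk ++ [vs + cur + s]) h2
        rw [show vs + (cur + s) = vs + cur + s by ring] at this
        exact this
      · have hcond : ¬ (vs + cur + s - vs ≤ max_frames) := by omega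
        have h3 := ih (cons ++ [cur]) (vs + cur) s [vs + cur, vs + cur + s]
          (by simp [pvLastA])
        simpa [hcond, hc, h, show vs + cur - vs = cur by omega] using h3

-- ===== VERDICT (by name: the statement is the Claim_ definition above) =====
theorem consolidate_group_frames_spec : Claim_equal_consolidate_group_frames := by
  intro sf mx _
  unfold Spec_consolidate_group_frames consolidate_group_frames consolidate_group_frames_alt
  by_cases h0 : sf = []
  · simp [h0]
  · by_cases h1 : sf.length = 1
    · simp [h0, h1]
    · simp only [h0, h1, if_false]
      rw [pvKp_eq sf [(0 : Int)] 0]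
      simp only [List.cons_append, List.nil_append, List.drop_succ_cons, List.drop_zero]
      have := pvLoop_eq (max_frames := mx) sf [] 0 0 [(0 : Int)] (by simp [pvLastA])
      simpa using this
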